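-- pv_equiv track=rewrite | github.com/chandramohantn/Product-Classification | Prepare_data.py | get_breadcrumb_vector
-- ===== SOURCE A (Python) =====
-- def get_breadcrumb_vector(s, attr):
-- 	a = [0 for i in range(len(attr))]
-- 	items = s.split(' ')
-- 	if len(items) > 0:
-- 		for i in items:
-- 			if i in attr:
-- 				a[attr[i]] += 1
-- 	return a
-- ===== SOURCE B (Python) =====
-- def get_breadcrumb_vector(s, attr):
-- 	freq = {}
-- 	for tok in s.split(' '):
-- 		freq[tok] = freq.get(tok, 0) + 1
-- 	a = [0] * len(attr)
-- 	for tok, c in freq.items():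
-- 		if tok in attr:
-- 			a[attr[tok]] += c
-- 	return a
-- ===== Notes on version B (the rewrite author's own statement) =====
-- stated objective: idiomatic
-- what changed: B first tallies the tokens into a frequency dict in one pass, then fills the vector in a second pass over the distinct tokens (one lookup and one addition per distinct token), instead of A's per-token membership-test-and-increment loop.
import Mathlib
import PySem

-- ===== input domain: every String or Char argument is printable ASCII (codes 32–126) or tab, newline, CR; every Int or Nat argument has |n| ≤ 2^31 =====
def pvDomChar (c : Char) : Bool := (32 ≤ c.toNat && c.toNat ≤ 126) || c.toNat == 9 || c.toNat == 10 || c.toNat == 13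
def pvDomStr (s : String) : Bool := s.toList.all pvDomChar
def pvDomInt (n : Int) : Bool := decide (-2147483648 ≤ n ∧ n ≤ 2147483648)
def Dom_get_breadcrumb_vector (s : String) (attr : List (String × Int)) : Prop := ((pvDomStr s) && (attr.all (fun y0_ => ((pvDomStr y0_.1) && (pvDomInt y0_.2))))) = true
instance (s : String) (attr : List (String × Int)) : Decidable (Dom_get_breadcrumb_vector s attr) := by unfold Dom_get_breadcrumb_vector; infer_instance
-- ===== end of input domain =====

-- B replaces A's per-token increment loop by a tally pass into a frequency dict followed by an
-- assignment pass over the distinct tokens (objective: idiomatic).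

-- ===== PORT A =====
def get_breadcrumb_vector (s : String) (attr : List (String × Int)) : List Int :=
  let d := PySem.Dict.ofList attr
  let a := (List.range d.size).map (fun _ => (0 : Int))      -- [0 for i in range(len(attr))]
  let items := (PySem.Str.split? s " ").getD []              -- s.split(' '); sep ≠ "" so always some
  if items.length > 0 then
    items.foldl (fun a i =>
      if d.contains i then
        PySem.List.pySetD a (d.getD i 0) (PySem.List.pyGetD a (d.getD i 0) 0 + 1)   -- a[attr[i]] += 1
      else a) a
  else a

-- ===== PORT B =====
def get_breadcrumb_vector_alt (s : String) (attr : List (String × Int)) : List Int :=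
  let d := PySem.Dict.ofList attr
  let freq := ((PySem.Str.split? s " ").getD []).foldl
      (fun f t => f.insert t (f.getD t 0 + 1)) PySem.Dict.empty      -- freq[tok] = freq.get(tok, 0) + 1
  let a := List.replicate d.size (0 : Int)                           -- [0] * len(attr)
  freq.items.foldl (fun a p =>
    if d.contains p.1 then
      PySem.List.pySetD a (d.getD p.1 0) (PySem.List.pyGetD a (d.getD p.1 0) 0 + p.2)   -- a[attr[tok]] += c
    else a) a

-- ===== PRECONDITION & SPEC =====
-- Pre_ excludes exactly the inputs on which A raises IndexError: a token of s that is a key of attr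
-- whose stored index is outside range(-len, len) of the vector (B raises the same way there).
def Pre_get_breadcrumb_vector (s : String) (attr : List (String × Int)) : Prop :=
  ∀ t ∈ (PySem.Str.split? s " ").getD [],
    (PySem.Dict.ofList attr).contains t = true →
    PySem.Raise.InRange (PySem.Dict.ofList attr).size ((PySem.Dict.ofList attr).getD t 0)
instance (s : String) (attr : List (String × Int)) : Decidable (Pre_get_breadcrumb_vector s attr) := by
  unfold Pre_get_breadcrumb_vector; infer_instance

def pvWitness_get_breadcrumb_vector : String × (List (String × Int)) :=
  ("a b a", [("a", 0), ("b", 1)])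

def Spec_get_breadcrumb_vector (s : String) (attr : List (String × Int)) (out : List Int) : Prop := out = get_breadcrumb_vector_alt s attr
instance (s : String) (attr : List (String × Int)) (out : List Int) : Decidable (Spec_get_breadcrumb_vector s attr out) := by unfold Spec_get_breadcrumb_vector; infer_instance

-- ===== CLAIM (what is proved, stated in full; the proofs are below) =====
def Claim_equal_get_breadcrumb_vector : Prop := ∀ (s : String) (attr : List (String × Int)), Dom_get_breadcrumb_vector s attr → Pre_get_breadcrumb_vector s attr → Spec_get_breadcrumb_vector s attr (get_breadcrumb_vector s attr)

-- ===== LEMMAS AND PROOFS =====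

-- Python's resolution of a (possibly negative) in-range index into a list of length n.
def pvRes (n : Nat) (i : Int) : Nat := if 0 ≤ i then i.toNat else n - (-i).toNat

lemma pvRes_lt (n : Nat) (i : Int) (h : PySem.Raise.InRange n i) : pvRes n i < n := by
  obtain ⟨h1, h2⟩ := h; unfold pvRes; split_ifs <;> omega

lemma pyIdx?_inRange (n : Nat) (i : Int) (h : PySem.Raise.InRange n i) :
    PySem.List.pyIdx? n i = some (pvRes n i) := by
  obtain ⟨h1, h2⟩ := h
  simp only [PySem.List.pyIdx?, pvRes]
  split_ifs <;> first | rfl | omega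

lemma pySetD_inRange {α : Type} (xs : List α) (i : Int) (v : α)
    (h : PySem.Raise.InRange xs.length i) :
    PySem.List.pySetD xs i v = xs.set (pvRes xs.length i) v := by
  simp [PySem.List.pySetD, PySem.List.pySet?, pyIdx?_inRange _ _ h]

lemma pyGetD_inRange (xs : List Int) (i : Int) (h : PySem.Raise.InRange xs.length i) :
    PySem.List.pyGetD xs i 0 = xs.getD (pvRes xs.length i) 0 := by
  simp [PySem.List.pyGetD, PySem.List.pyGet?, pyIdx?_inRange _ _ h, List.getD]

lemma bump_getD (xs : List Int) (j k : Nat) (c : Int) (hj : j < xs.length) :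
    (xs.set j (xs.getD j 0 + c)).getD k 0 = xs.getD k 0 + (if j = k then c else 0) := by
  simp only [List.getD_eq_getElem?_getD, List.getElem?_set]
  by_cases hjk : j = k
  · subst hjk
    simp [hj, List.getElem?_eq_getElem hj]
  · simp [hjk]

-- the A-side loop step and B-side loop step, abstracted over the dict
def pvStepA (d : PySem.Dict String Int) (a : List Int) (t : String) : List Int :=
  if d.contains t then
    PySem.List.pySetD a (d.getD t 0) (PySem.List.pyGetD a (d.getD t 0) 0 + 1)
  else a

def pvStepB (d : PySem.Dict String Int) (a : List Int) (p : String × Int) : List Int :=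
  if d.contains p.1 then
    PySem.List.pySetD a (d.getD p.1 0) (PySem.List.pyGetD a (d.getD p.1 0) 0 + p.2)
  else a

def pvHit (d : PySem.Dict String Int) (n k : Nat) (t : String) : Bool :=
  d.contains t && (pvRes n (d.getD t 0) == k)

lemma length_foldl_stepA (d : PySem.Dict String Int) (toks : List String) (a : List Int) :
    (toks.foldl (pvStepA d) a).length = a.length := by
  induction toks generalizing a with
  | nil => rfl
  | cons t toks ih =>
      simp only [List.foldl_cons]
      rw [ih]
      unfold pvStepA
      split_ifs <;> simp [PySem.List.length_pySetD]

lemma length_foldl_stepB (d : PySem.Dict String Int) (l : List (String × Int)) (a : List Int) :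
    (l.foldl (pvStepB d) a).length = a.length := by
  induction l generalizing a with
  | nil => rfl
  | cons p l ih =>
      simp only [List.foldl_cons]
      rw [ih]
      unfold pvStepB
      split_ifs <;> simp [PySem.List.length_pySetD]

lemma foldA_getD (d : PySem.Dict String Int) (n : Nat) (toks : List String) :
    ∀ (a : List Int), a.length = n →
    (∀ t ∈ toks, d.contains t = true → PySem.Raise.InRange n (d.getD t 0)) →
    ∀ k, (toks.foldl (pvStepA d) a).getD k 0
        = a.getD k 0 + (toks.countP (pvHit d n k) : Int) := by
  induction toks with
  | nil => intro a _ _ k; simp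
  | cons t toks ih =>
      intro a ha hin k
      simp only [List.foldl_cons]
      have hstep : ∀ k', (pvStepA d a t).getD k' 0
          = a.getD k' 0 + (if pvHit d n k' t then 1 else 0) := by
        intro k'
        unfold pvStepA pvHit
        by_cases hc : d.contains t = true
        · have hr : PySem.Raise.InRange a.length (d.getD t 0) := by
            rw [ha]; exact hin t (by simp) hc
          rw [if_pos hc, pySetD_inRange _ _ _ hr, pyGetD_inRange _ _ hr]
          rw [bump_getD _ _ _ _ (pvRes_lt _ _ hr)]
          rw [ha]
          by_cases hk : pvRes n (d.getD t 0) = k' <;> simp [hc, hk]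
        · simp [hc]
      have hlen : (pvStepA d a t).length = n := by
        unfold pvStepA; split_ifs <;> simp [PySem.List.length_pySetD, ha]
      rw [ih (pvStepA d a t) hlen (fun t' ht' => hin t' (by simp [ht'])) k, hstep k,
        List.countP_cons]
      by_cases hp : pvHit d n k t <;> simp [hp] <;> push_cast <;> ring

lemma foldB_getD (d : PySem.Dict String Int) (n : Nat) (l : List (String × Int)) :
    ∀ (a : List Int), a.length = n →
    (∀ p ∈ l, d.contains p.1 = true → PySem.Raise.InRange n (d.getD p.1 0)) →
    ∀ k, (l.foldl (pvStepB d) a).getD k 0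
        = a.getD k 0 + ((l.filter (fun p => pvHit d n k p.1)).map (·.2)).sum := by
  induction l with
  | nil => intro a _ _ k; simp
  | cons p l ih =>
      intro a ha hin k
      simp only [List.foldl_cons]
      have hstep : ∀ k', (pvStepB d a p).getD k' 0
          = a.getD k' 0 + (if pvHit d n k' p.1 then p.2 else 0) := by
        intro k'
        unfold pvStepB pvHit
        by_cases hc : d.contains p.1 = true
        · have hr : PySem.Raise.InRange a.length (d.getD p.1 0) := by
            rw [ha]; exact hin p (by simp) hc
          rw [if_pos hc, pySetD_inRange _ _ _ hr, pyGetD_inRange _ _ hr]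
          rw [bump_getD _ _ _ _ (pvRes_lt _ _ hr)]
          rw [ha]
          by_cases hk : pvRes n (d.getD p.1 0) = k' <;> simp [hc, hk]
        · simp [hc]
      have hlen : (pvStepB d a p).length = n := by
        unfold pvStepB; split_ifs <;> simp [PySem.List.length_pySetD, ha]
      rw [ih (pvStepB d a p) hlen (fun p' hp' => hin p' (by simp [hp'])) k, hstep k,
        List.filter_cons]
      by_cases hp : pvHit d n k p.1 <;> simp [hp] <;> ring

lemma countP_filter_ne (q : String → Bool) (y : String) (toks : List String) :
    toks.countP q
      = (toks.filter (fun t => !(t == y))).countP q + (if q y then toks.count y else 0) := by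
  induction toks with
  | nil => simp
  | cons x toks ih =>
      by_cases hx : x = y
      · subst hx
        simp only [List.countP_cons, List.count_cons, List.filter_cons, beq_self_eq_true,
          Bool.not_true, if_false]
        rw [ih]
        by_cases hq : q x <;> simp [hq] <;> omega
      · have hfx : ((x :: toks).filter (fun t => !(t == y))) = x :: toks.filter (fun t => !(t == y)) := by
          simp [List.filter_cons, hx]
        rw [hfx, List.countP_cons, List.countP_cons, List.count_cons, ih]
        by_cases hq : q x <;> by_cases hqy : q y <;> simp [hq, hqy, hx] <;> omega

lemma sum_filter_count (q : String → Bool) (ys : List String) :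
    ∀ (toks : List String), ys.Nodup → (∀ t, t ∈ ys ↔ t ∈ toks) →
    ((ys.filter q).map (fun t => (toks.count t : Int))).sum = (toks.countP q : Int) := by
  induction ys with
  | nil =>
      intro toks _ hm
      have : toks = [] := List.eq_nil_iff_forall_not_mem.mpr (fun t ht => by
        exact absurd ((hm t).mpr ht) (List.not_mem_nil))
      subst this; simp
  | cons y ys ih =>
      intro toks hnd hm
      have hy : y ∉ ys := (List.nodup_cons.mp hnd).1
      have hnd' : ys.Nodup := (List.nodup_cons.mp hnd).2
      set toks' := toks.filter (fun t => !(t == y)) with htoks'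
      have hm' : ∀ t, t ∈ ys ↔ t ∈ toks' := by
        intro t
        constructor
        · intro ht
          have htn : t ≠ y := fun h => hy (h ▸ ht)
          have : t ∈ toks := (hm t).mp (List.mem_cons_of_mem _ ht)
          simp [htoks', List.mem_filter, this, htn]
        · intro ht
          have h1 : t ∈ toks := List.mem_of_mem_filter ht
          have h2 : t ≠ y := by
            have := (List.mem_filter.mp ht).2; simpa using this
          rcases List.mem_cons.mp ((hm t).mpr h1) with h | h
          · exact absurd h h2
          · exact h
      have hcnt : ∀ t ∈ ys.filter q, (toks.count t : Int) = (toks'.count t : Int) := by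
        intro t ht
        have htys : t ∈ ys := List.mem_of_mem_filter ht
        have htn : t ≠ y := fun h => hy (h ▸ htys)
        congr 1
        rw [htoks', List.count_filter]
        simp [htn]
      rw [List.filter_cons]
      rw [countP_filter_ne q y toks]
      by_cases hq : q y
      · simp only [hq, if_true]
        rw [List.map_cons, List.sum_cons]
        rw [List.map_congr_left hcnt]
        rw [ih toks' hnd' hm']
        push_cast
        ring
      · simp only [hq, Bool.false_eq_true, if_false]
        rw [List.map_congr_left hcnt]
        rw [ih toks' hnd' hm']
        simp [htoks']

-- ===== VERDICT (by name: the statement is the Claim_ definition above) =====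
theorem get_breadcrumb_vector_spec : Claim_equal_get_breadcrumb_vector := by
  intro s attr _ hpre
  unfold Spec_get_breadcrumb_vector get_breadcrumb_vector get_breadcrumb_vector_alt
  simp only []
  set d := PySem.Dict.ofList attr with hd
  set n := d.size with hn
  set toks := (PySem.Str.split? s " ").getD [] with htoks
  have hinit : (List.range n).map (fun _ => (0 : Int)) = List.replicate n 0 := by
    simp [List.map_const']
  have hfreq : toks.foldl (fun f t => f.insert t (f.getD t 0 + 1)) PySem.Dict.empty
      = PySem.Dict.counter toks := PySem.Dict.foldl_insert_getD_add_one_eq_counter toks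
  have hin : ∀ t ∈ toks, d.contains t = true → PySem.Raise.InRange n (d.getD t 0) := hpre
  rw [hinit, hfreq]
  have hitems : (PySem.Dict.counter toks).items
      = (PySem.Set.ofList toks).map (fun t => (t, (toks.count t : Int))) :=
    PySem.Dict.items_counter toks
  rw [hitems]
  simp only [show (fun (a : List Int) (i : String) =>
      if d.contains i = true then
        PySem.List.pySetD a (d.getD i 0) (PySem.List.pyGetD a (d.getD i 0) 0 + 1)
      else a) = pvStepA d from rfl,
    show (fun (a : List Int) (p : String × Int) =>
      if d.contains p.1 = true then
        PySem.List.pySetD a (d.getD p.1 0) (PySem.List.pyGetD a (d.getD p.1 0) 0 + p.2)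
      else a) = pvStepB d from rfl]
  set l := (PySem.Set.ofList toks).map (fun t => (t, (toks.count t : Int))) with hl
  have hinB : ∀ p ∈ l, d.contains p.1 = true → PySem.Raise.InRange n (d.getD p.1 0) := by
    intro p hp
    rw [hl] at hp
    obtain ⟨t, ht, rfl⟩ := List.mem_map.mp hp
    exact hin t ((PySem.Set.mem_ofList toks t).mp ht)
  have hsum : ∀ k, ((l.filter (fun p => pvHit d n k p.1)).map (·.2)).sum
      = (toks.countP (pvHit d n k) : Int) := by
    intro k
    have : l.filter (fun p => pvHit d n k p.1)
        = ((PySem.Set.ofList toks).filter (pvHit d n k)).map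
            (fun t => (t, (toks.count t : Int))) := by
      rw [hl, List.filter_map]
      rfl
    rw [this, List.map_map]
    have := sum_filter_count (pvHit d n k) (PySem.Set.ofList toks) toks
      (PySem.Set.nodup_ofList toks) (fun t => PySem.Set.mem_ofList toks t)
    simpa using this
  -- both sides: handle the (always-true in Python) nonempty test by cases
  by_cases hne : toks.length > 0
  · simp only [if_pos hne]
    apply List.ext_getElem
    · rw [length_foldl_stepA d toks, length_foldl_stepB d l] <;>
        simp [List.length_replicate]
    · intro k hk1 hk2
      have hlenA : (toks.foldl (pvStepA d) (List.replicate n (0:Int))).length = n := by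
        rw [length_foldl_stepA]; simp
      have hlenB : (l.foldl (pvStepB d) (List.replicate n (0:Int))).length = n := by
        rw [length_foldl_stepB]; simp
      have hA := foldA_getD d n toks (List.replicate n 0) (by simp) hin k
      have hB := foldB_getD d n l (List.replicate n 0) (by simp) hinB k
      have e1 : (toks.foldl (pvStepA d) (List.replicate n (0:Int)))[k]
          = (toks.foldl (pvStepA d) (List.replicate n (0:Int))).getD k 0 := by
        rw [List.getD_eq_getElem?_getD, List.getElem?_eq_getElem hk1]; rfl
      have e2 : (l.foldl (pvStepB d) (List.replicate n (0:Int)))[k]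
          = (l.foldl (pvStepB d) (List.replicate n (0:Int))).getD k 0 := by
        rw [List.getD_eq_getElem?_getD, List.getElem?_eq_getElem hk2]; rfl
      show (toks.foldl (pvStepA d) _)[k] = (l.foldl (pvStepB d) _)[k]
      rw [e1, e2, hA, hB, hsum k]
  · -- toks = []; then l = [] as well and both sides are the zero vector
    have htnil : toks = [] := by
      have : toks.length = 0 := by omega
      exact List.length_eq_zero_iff.mp this
    have hlnil : l = [] := by rw [hl, htnil]; rfl
    simp [hlnil, htnil]
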